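-- pv_equiv track=rewrite | github.com/EpiForeSITE/ForeSITE_Alerting_Report | src/Project/ForeSITETestApp/ForeSITETestApp/Python/epyflaServer.py | split_code_into_blocks
-- ===== SOURCE A (Python) =====
-- def split_code_into_blocks(code):
--     """
--     Split code into logical blocks that respect Python's indentation structure.
--     This ensures multi-line constructs like if/for/while blocks stay together.
--     """
--     lines = code.split('\n')
--     blocks = []
--     current_block = []
--
--     i = 0
--     while i < len(lines):
--         line = lines[i]
--         stripped = line.strip()
--
--         # Skip empty lines
--         if not stripped:
--             if current_block:
--                 current_block.append(line)
--             i += 1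
--             continue
--
--         # Skip comments but preserve them
--         if stripped.startswith('#'):
--             if current_block:
--                 current_block.append(line)
--             else:
--                 blocks.append(line)
--             i += 1
--             continue
--
--         # Calculate indentation
--         indent = len(line) - len(line.lstrip())
--
--         # Check if this line starts a block (ends with colon)
--         if stripped.endswith(':'):
--             # This line starts a new block, collect it and its indented content
--             current_block = [line]
--             base_indent = indent
--             i += 1
--
--             # Collect all lines that belong to this block
--             while i < len(lines):
--                 next_line = lines[i]
--                 next_stripped = next_line.strip()
--
--                 # Skip empty lines and comments within the block
--                 if not next_stripped or next_stripped.startswith('#'):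
--                     current_block.append(next_line)
--                     i += 1
--                     continue
--
--                 next_indent = len(next_line) - len(next_line.lstrip())
--
--                 # If this line is indented more than the base, it belongs to the block
--                 if next_indent > base_indent:
--                     current_block.append(next_line)
--                     i += 1
--                 elif next_indent == base_indent and next_stripped.startswith(('elif', 'else', 'except', 'finally')):
--                     # Special case for elif, else, except, finally
--                     current_block.append(next_line)
--                     i += 1
--                 else:
--                     # This line is at the same or lesser indentation, end the block
--                     break
--
--             # Add the completed block
--             blocks.append('\n'.join(current_block))
--             current_block = []
--         else:
--             # Single line statement
--             if current_block:
--                 blocks.append('\n'.join(current_block))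
--                 current_block = []
--             blocks.append(line)
--             i += 1
--
--     # Add any remaining block
--     if current_block:
--         blocks.append('\n'.join(current_block))
--
--     return blocks
-- ===== SOURCE B (Python) =====
-- def split_code_into_blocks(code):
--     """
--     Split code into logical blocks that respect Python's indentation structure.
--     Flat single loop with explicit in-block state (base_indent is None when
--     not inside a block) instead of nested while loops sharing an index.
--     """
--     blocks = []
--     current_block = []
--     base_indent = None
--
--     for line in code.split('\n'):
--         stripped = line.strip()
--
--         if base_indent is not None:
--             # We are inside a block: decide continuation or closure.
--             if not stripped or stripped.startswith('#'):
--                 current_block.append(line)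
--                 continue
--             indent = len(line) - len(line.lstrip())
--             if indent > base_indent or (indent == base_indent and
--                     stripped.startswith(('elif', 'else', 'except', 'finally'))):
--                 current_block.append(line)
--                 continue
--             # Close the block and fall through to reprocess this line.
--             blocks.append('\n'.join(current_block))
--             current_block = []
--             base_indent = None
--
--         if not stripped:
--             continue
--         if stripped.startswith('#'):
--             blocks.append(line)
--         elif stripped.endswith(':'):
--             current_block = [line]
--             base_indent = len(line) - len(line.lstrip())
--         else:
--             blocks.append(line)
--
--     if base_indent is not None:
--         blocks.append('\n'.join(current_block))
--
--     return blocks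
-- ===== Notes on version B (the rewrite author's own statement) =====
-- stated objective: alternative
-- what changed: Replaced A's nested while loops sharing one index (inner loop consuming the block body) with a single flat pass over the lines that keeps explicit state (current block plus an Option base-indent) and closes a block by falling through to the free-line handler on the same line.
import Mathlib
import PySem

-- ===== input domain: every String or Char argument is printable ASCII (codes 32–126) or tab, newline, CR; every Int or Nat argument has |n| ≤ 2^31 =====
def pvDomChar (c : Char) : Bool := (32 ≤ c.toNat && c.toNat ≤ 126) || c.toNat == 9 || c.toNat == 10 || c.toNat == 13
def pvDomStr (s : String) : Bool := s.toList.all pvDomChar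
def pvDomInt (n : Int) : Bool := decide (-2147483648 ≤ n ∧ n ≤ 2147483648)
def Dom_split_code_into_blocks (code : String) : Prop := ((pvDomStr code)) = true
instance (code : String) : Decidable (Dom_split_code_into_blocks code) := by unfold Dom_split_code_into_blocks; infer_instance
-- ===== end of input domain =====

-- B replaces A's nested while loops sharing one index by a single flat pass with an
-- explicit Option base-indent state (objective: alternative decomposition, same cost).

-- shared helpers (both Pythons compute these identical subexpressions)
def pyIndent (l : String) : Int := PySem.Str.len l - PySem.Str.len (PySem.Str.lstrip l)

def contKw (st : String) : Bool :=
  PySem.Str.startswith st "elif" || PySem.Str.startswith st "else" ||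
  PySem.Str.startswith st "except" || PySem.Str.startswith st "finally"

-- ===== PORT A =====
-- inner 'while i < len(lines)' collecting a block; returns (remaining lines, current_block)
def aInner : List String → Int → List String → List String × List String
  | [], _, cb => ([], cb)
  | l :: rest, base, cb =>
    let st := PySem.Str.strip l
    if st = "" ∨ PySem.Str.startswith st "#" = true then aInner rest base (cb ++ [l])
    else
      let ind := pyIndent l
      if base < ind then aInner rest base (cb ++ [l])
      else if ind = base ∧ contKw st = true then aInner rest base (cb ++ [l])
      else (l :: rest, cb)

-- termination measure for the outer loop
theorem aInner_len (lines : List String) (base : Int) (cb : List String) :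
    (aInner lines base cb).1.length ≤ lines.length := by
  induction lines generalizing cb with
  | nil => simp [aInner]
  | cons l rest ih =>
    simp only [aInner]
    split_ifs <;> simp <;> exact le_trans (ih _) (Nat.le_succ _)

-- outer 'while i < len(lines)' plus the trailing flush
def aOuter : List String → List String → List String → List String
  | [], cb, blocks => if cb = [] then blocks else blocks ++ [PySem.Str.join "\n" cb]
  | l :: rest, cb, blocks =>
    let st := PySem.Str.strip l
    if st = "" then aOuter rest (if cb = [] then cb else cb ++ [l]) blocks
    else if PySem.Str.startswith st "#" = true then
      (if cb = [] then aOuter rest cb (blocks ++ [l]) else aOuter rest (cb ++ [l]) blocks)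
    else
      let ind := pyIndent l
      if PySem.Str.endswith st ":" = true then
        let p := aInner rest ind [l]
        aOuter p.1 [] (blocks ++ [PySem.Str.join "\n" p.2])
      else
        let blocks' := if cb = [] then blocks else blocks ++ [PySem.Str.join "\n" cb]
        aOuter rest [] (blocks' ++ [l])
  termination_by lines _ _ => lines.length
  decreasing_by
  · simp
  · simp
  · simp
  · exact Nat.lt_succ_of_le (aInner_len _ _ _)
  · simp

def split_code_into_blocks (code : String) : List String :=
  aOuter ((PySem.Str.split? code "\n").getD []) [] []

-- ===== PORT B =====
-- handler for a line seen while NOT inside a block (the fall-through target);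
-- returns the new (blocks, current_block, base_indent)
def bFree (blocks : List String) (l : String) : List String × List String × Option Int :=
  let st := PySem.Str.strip l
  if st = "" then (blocks, [], none)
  else if PySem.Str.startswith st "#" = true then (blocks ++ [l], [], none)
  else if PySem.Str.endswith st ":" = true then (blocks, [l], some (pyIndent l))
  else (blocks ++ [l], [], none)

-- the single flat 'for line in lines' loop with state (blocks, current_block, base_indent)
def bLoop : List String → List String → List String → Option Int → List String
  | [], blocks, cb, base? =>
    (match base? with
     | some _ => blocks ++ [PySem.Str.join "\n" cb]
     | none => blocks)
  | l :: rest, blocks, cb, base? =>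
    match base? with
    | some base =>
      let st := PySem.Str.strip l
      if st = "" ∨ PySem.Str.startswith st "#" = true then bLoop rest blocks (cb ++ [l]) (some base)
      else
        let ind := pyIndent l
        if base < ind ∨ (ind = base ∧ contKw st = true) then bLoop rest blocks (cb ++ [l]) (some base)
        else
          -- close the block and fall through to the free-line handler on the same line
          let s := bFree (blocks ++ [PySem.Str.join "\n" cb]) l
          bLoop rest s.1 s.2.1 s.2.2
    | none =>
      let s := bFree blocks l
      bLoop rest s.1 s.2.1 s.2.2

def split_code_into_blocks_alt (code : String) : List String :=
  bLoop ((PySem.Str.split? code "\n").getD []) [] [] none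

-- ===== PRECONDITION & SPEC =====
def Spec_split_code_into_blocks (code : String) (out : List String) : Prop := out = split_code_into_blocks_alt code
instance (code : String) (out : List String) : Decidable (Spec_split_code_into_blocks code out) := by unfold Spec_split_code_into_blocks; infer_instance

-- ===== CLAIM (what is proved, stated in full; the proofs are below) =====
def Claim_equal_split_code_into_blocks : Prop := ∀ (code : String), Dom_split_code_into_blocks code → Spec_split_code_into_blocks code (split_code_into_blocks code)

-- ===== LEMMAS AND PROOFS =====

-- main invariant: with empty current_block, A's outer loop equals B's loop out of
-- block state, and A's inner collection followed by the outer loop equals B's loop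
-- in block state
theorem main_aux : ∀ (n : Nat) (lines : List String), lines.length ≤ n →
    (∀ blocks, aOuter lines [] blocks = bLoop lines blocks [] none) ∧
    (∀ base cb blocks,
      aOuter (aInner lines base cb).1 [] (blocks ++ [PySem.Str.join "\n" (aInner lines base cb).2])
        = bLoop lines blocks cb (some base)) := by
  intro n
  induction n with
  | zero =>
    intro lines hlen
    have h0 : lines = [] := List.eq_nil_of_length_eq_zero (Nat.le_zero.mp hlen)
    subst h0
    constructor
    · intro blocks; simp [aOuter, bLoop]
    · intro base cb blocks; simp [aInner, aOuter, bLoop]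
  | succ n ih =>
    intro lines hlen
    cases lines with
    | nil =>
      constructor
      · intro blocks; simp [aOuter, bLoop]
      · intro base cb blocks; simp [aInner, aOuter, bLoop]
    | cons l rest =>
      have hrest : rest.length ≤ n := by simp at hlen; omega
      -- the free-line step: processing line l with empty current_block in A equals
      -- B's free-line handler followed by the loop on rest
      have hfree : ∀ blocks, aOuter (l :: rest) [] blocks =
          bLoop rest (bFree blocks l).1 (bFree blocks l).2.1 (bFree blocks l).2.2 := by
        intro blocks
        simp only [aOuter, bFree]
        split_ifs with h1 h2 h3
        · exact (ih rest hrest).1 blocks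
        · exact (ih rest hrest).1 (blocks ++ [l])
        · exact (ih rest hrest).2 (pyIndent l) [l] blocks
        · exact (ih rest hrest).1 (blocks ++ [l])
      constructor
      · intro blocks
        rw [hfree blocks]
        simp only [bLoop]
      · intro base cb blocks
        simp only [aInner, bLoop]
        by_cases h1 : PySem.Str.strip l = "" ∨ PySem.Str.startswith (PySem.Str.strip l) "#" = true
        · rw [if_pos h1, if_pos h1]
          exact (ih rest hrest).2 base (cb ++ [l]) blocks
        · rw [if_neg h1, if_neg h1]
          by_cases h2 : base < pyIndent l
          · rw [if_pos h2, if_pos (Or.inl h2 : base < pyIndent l ∨ (pyIndent l = base ∧ contKw (PySem.Str.strip l) = true))]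
            exact (ih rest hrest).2 base (cb ++ [l]) blocks
          · rw [if_neg h2]
            by_cases h3 : pyIndent l = base ∧ contKw (PySem.Str.strip l) = true
            · rw [if_pos h3, if_pos (Or.inr h3 : base < pyIndent l ∨ (pyIndent l = base ∧ contKw (PySem.Str.strip l) = true))]
              exact (ih rest hrest).2 base (cb ++ [l]) blocks
            · have hnc : ¬ (base < pyIndent l ∨ (pyIndent l = base ∧ contKw (PySem.Str.strip l) = true)) := by
                rintro (h | h)
                · exact h2 h
                · exact h3 h
              rw [if_neg h3, if_neg hnc]
              exact hfree (blocks ++ [PySem.Str.join "\n" cb])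

-- ===== VERDICT (by name: the statement is the Claim_ definition above) =====
theorem split_code_into_blocks_spec : Claim_equal_split_code_into_blocks := by
  intro code _
  unfold Spec_split_code_into_blocks split_code_into_blocks split_code_into_blocks_alt
  exact (main_aux _ _ le_rfl).1 []
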